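-- pv_equiv track=rewrite | github.com/xlab-uiuc/openctest | core/run_ctest/run_test_utils.py | group_test_by_cls
-- ===== SOURCE A (Python) =====
-- def group_test_by_cls(tests):
--     d = {}
--     for t in tests:
--         clsname, method = t.split("#")
--         if clsname not in d:
--             d[clsname] = set()
--         d[clsname].add(method)
--     return d
-- ===== SOURCE B (Python) =====
-- def group_test_by_cls(tests):
--     pairs = []
--     for t in tests:
--         clsname, method = t.split("#")
--         pairs.append((clsname, method))
--     return {c: {m for cc, m in pairs if cc == c}
--             for c in dict.fromkeys(c for c, _ in pairs)}
-- ===== Notes on version B (the rewrite author's own statement) =====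
-- stated objective: alternative
-- what changed: Replaces the incremental check-key-then-insert dict-of-sets loop by a two-phase decomposition: parse all tests into (class, method) pairs once, then build the result as a dict comprehension over the first-occurrence-ordered class names, collecting each class's methods with a per-class set comprehension.
import Mathlib
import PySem

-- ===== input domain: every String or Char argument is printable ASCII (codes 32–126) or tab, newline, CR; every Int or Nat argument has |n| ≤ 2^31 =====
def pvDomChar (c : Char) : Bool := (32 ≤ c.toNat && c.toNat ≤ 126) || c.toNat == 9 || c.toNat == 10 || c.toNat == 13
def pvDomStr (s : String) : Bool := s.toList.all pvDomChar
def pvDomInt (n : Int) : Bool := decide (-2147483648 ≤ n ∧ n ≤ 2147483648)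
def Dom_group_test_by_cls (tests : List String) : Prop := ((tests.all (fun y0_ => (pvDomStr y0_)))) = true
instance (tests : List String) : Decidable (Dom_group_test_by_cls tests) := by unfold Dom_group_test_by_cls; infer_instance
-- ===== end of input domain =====

-- B replaces A's incremental check-key-then-insert dict-of-sets loop by a two-phase
-- decomposition (parse into pairs, then a per-class grouping comprehension over the
-- deduplicated class names); alternative structure, not claimed faster.


-- ===== PORT A =====
-- loop body of A: clsname, method = t.split("#"); if clsname not in d: d[clsname] = set(); d[clsname].add(method)
-- (the `_ => d` branch is Python's ValueError from unpacking; such inputs are excluded by Pre_)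
def pvStepA (d : PySem.Dict String (List String)) (t : String) : PySem.Dict String (List String) :=
  match PySem.Str.split? t "#" with
  | some [clsname, method] =>
      let d' := if d.contains clsname then d else d.insert clsname PySem.Set.empty
      d'.modify clsname [] (fun s => PySem.Set.add s method)
  | _ => d

def group_test_by_cls (tests : List String) : List (String × List String) :=
  (tests.foldl pvStepA PySem.Dict.empty).items

-- ===== PORT B =====
-- loop body of B's first pass: clsname, method = t.split("#"); pairs.append((clsname, method))
def pvStepB (ps : List (String × String)) (t : String) : List (String × String) :=
  match PySem.Str.split? t "#" with
  | some [clsname, method] => ps ++ [(clsname, method)]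
  | _ => ps

def group_test_by_cls_alt (tests : List String) : List (String × List String) :=
  let pairs := tests.foldl pvStepB []
  -- {c : {m for cc, m in pairs if cc == c} for c in dict.fromkeys(c for c, _ in pairs)}
  (PySem.List.dedup (pairs.map (fun p => p.1))).map
    (fun c => (c, PySem.Set.ofList ((pairs.filter (fun p => p.1 == c)).map (fun p => p.2))))

-- ===== PRECONDITION & SPEC =====
-- Pre_ excludes exactly the inputs on which A raises ValueError: a test string whose
-- split on '#' does not have exactly two parts (no '#', or more than one).
def Pre_group_test_by_cls (tests : List String) : Prop :=
  ∀ t ∈ tests, ((PySem.Str.split? t "#").getD []).length = 2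
instance (tests : List String) : Decidable (Pre_group_test_by_cls tests) := by
  unfold Pre_group_test_by_cls; infer_instance

def pvWitness_group_test_by_cls : List String := ["ClsA#t1", "ClsB#t2", "ClsA#t1", "ClsA#t3"]

def Spec_group_test_by_cls (tests : List String) (out : List (String × List String)) : Prop := out = group_test_by_cls_alt tests
instance (tests : List String) (out : List (String × List String)) : Decidable (Spec_group_test_by_cls tests out) := by unfold Spec_group_test_by_cls; infer_instance

-- ===== CLAIM (what is proved, stated in full; the proofs are below) =====
def Claim_equal_group_test_by_cls : Prop := ∀ (tests : List String), Dom_group_test_by_cls tests → Pre_group_test_by_cls tests → Spec_group_test_by_cls tests (group_test_by_cls tests)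

-- ===== LEMMAS AND PROOFS =====

-- the (class, method) pair a good test string parses to
def pvParse (t : String) : String × String :=
  match PySem.Str.split? t "#" with
  | some [clsname, method] => (clsname, method)
  | _ => ("", "")

theorem pvParse_eq {t : String} (h : ((PySem.Str.split? t "#").getD []).length = 2) :
    PySem.Str.split? t "#" = some [(pvParse t).1, (pvParse t).2] := by
  unfold pvParse
  match hs : PySem.Str.split? t "#" with
  | some [c, m] => simp
  | none => rw [hs] at h; simp at h
  | some [] => rw [hs] at h; simp at h
  | some [c] => rw [hs] at h; simp at h
  | some (c :: m :: x :: rest) => rw [hs] at h; simp at h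

theorem pvStepB_good {t : String} (ps : List (String × String))
    (h : ((PySem.Str.split? t "#").getD []).length = 2) : pvStepB ps t = ps ++ [pvParse t] := by
  unfold pvStepB; rw [pvParse_eq h]

theorem foldB_eq (ts : List String) (ps : List (String × String))
    (h : ∀ t ∈ ts, ((PySem.Str.split? t "#").getD []).length = 2) :
    ts.foldl pvStepB ps = ps ++ ts.map pvParse := by
  induction ts generalizing ps with
  | nil => simp
  | cons t ts ih =>
    simp only [List.foldl_cons, List.map_cons]
    rw [pvStepB_good ps (h t (by simp)), ih _ (fun x hx => h x (by simp [hx]))]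
    simp

theorem pvStepA_keys {t : String} (d : PySem.Dict String (List String))
    (h : ((PySem.Str.split? t "#").getD []).length = 2) :
    (pvStepA d t).keys = PySem.Set.add d.keys (pvParse t).1 := by
  unfold pvStepA
  rw [pvParse_eq h]
  by_cases hc : d.contains (pvParse t).1 = true
  · simp only [hc, if_pos]
    rw [PySem.Dict.keys_modify, PySem.Dict.keys_insert_of_contains _ _ hc,
      PySem.Set.add_of_mem ((PySem.Dict.contains_iff_mem_keys d _).mp hc)]
  · have hc' : d.contains (pvParse t).1 = false := by simpa using hc
    simp only [hc', Bool.false_eq_true, if_neg, not_false_eq_true]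
    rw [PySem.Dict.keys_modify, PySem.Dict.keys_insert_of_contains _ _
      (by rw [PySem.Dict.contains_insert]; simp),
      PySem.Dict.keys_insert_of_not_contains _ _ hc',
      PySem.Set.add_of_not_mem (fun hm => by
        rw [(PySem.Dict.contains_iff_mem_keys d _).mpr hm] at hc'; cases hc')]

theorem foldA_keys (ts : List String) (d : PySem.Dict String (List String))
    (h : ∀ t ∈ ts, ((PySem.Str.split? t "#").getD []).length = 2) :
    (ts.foldl pvStepA d).keys = PySem.Set.update d.keys ((ts.map pvParse).map (fun p => p.1)) := by
  induction ts generalizing d with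
  | nil => simp [PySem.Set.update]
  | cons t ts ih =>
    simp only [List.foldl_cons, List.map_cons]
    rw [ih _ (fun x hx => h x (by simp [hx])), pvStepA_keys d (h t (by simp))]
    simp [PySem.Set.update]

theorem pvStepA_getD {t : String} (d : PySem.Dict String (List String)) (c : String)
    (h : ((PySem.Str.split? t "#").getD []).length = 2) :
    (pvStepA d t).getD c [] =
      if c = (pvParse t).1 then PySem.Set.add (d.getD c []) (pvParse t).2 else d.getD c [] := by
  unfold pvStepA
  rw [pvParse_eq h]
  by_cases hc : d.contains (pvParse t).1 = true
  · simp only [hc, if_pos]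
    by_cases hck : c = (pvParse t).1
    · subst hck; rw [PySem.Dict.getD_modify_self]; simp
    · rw [PySem.Dict.getD_modify_of_ne _ _ _ hck]; simp [hck]
  · have hc' : d.contains (pvParse t).1 = false := by simpa using hc
    simp only [hc', Bool.false_eq_true, if_neg, not_false_eq_true]
    by_cases hck : c = (pvParse t).1
    · subst hck
      rw [PySem.Dict.getD_modify_self, PySem.Dict.getD_insert_self,
        PySem.Dict.getD_of_not_contains _ _ hc']
      simp [PySem.Set.empty]
    · rw [PySem.Dict.getD_modify_of_ne _ _ _ hck, PySem.Dict.getD_insert_of_ne _ _ _ hck]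
      simp [hck]

theorem foldA_getD (ts : List String) (d : PySem.Dict String (List String)) (c : String)
    (h : ∀ t ∈ ts, ((PySem.Str.split? t "#").getD []).length = 2) :
    (ts.foldl pvStepA d).getD c [] =
      (((ts.map pvParse).filter (fun p => p.1 == c)).map (fun p => p.2)).foldl
        PySem.Set.add (d.getD c []) := by
  induction ts generalizing d with
  | nil => simp
  | cons t ts ih =>
    simp only [List.foldl_cons, List.map_cons, List.filter_cons]
    rw [ih _ (fun x hx => h x (by simp [hx])), pvStepA_getD d c (h t (by simp))]
    by_cases hck : c = (pvParse t).1
    · simp [hck]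
    · have : ((pvParse t).1 == c) = false := by
        simp [Ne.symm hck]
      simp [hck, this]

theorem group_test_by_cls_spec : Claim_equal_group_test_by_cls := by
  intro tests _ hpre
  unfold Spec_group_test_by_cls group_test_by_cls group_test_by_cls_alt
  have hB : tests.foldl pvStepB [] = tests.map pvParse := by
    rw [foldB_eq tests [] hpre]; simp
  have hkeys : (tests.foldl pvStepA PySem.Dict.empty).keys =
      PySem.Set.ofList ((tests.map pvParse).map (fun p => p.1)) := by
    rw [foldA_keys tests _ hpre, PySem.Set.ofList_eq_foldl]
    simp [PySem.Set.update, PySem.Dict.keys_empty]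
  have hnd : (tests.foldl pvStepA PySem.Dict.empty).keys.Nodup := by
    rw [hkeys]; exact PySem.Set.nodup_ofList _
  rw [PySem.Dict.items_eq_map_keys _ hnd [], hkeys]
  show _ = (PySem.List.dedup ((tests.foldl pvStepB []).map (fun p => p.1))).map
      (fun c => (c, PySem.Set.ofList (((tests.foldl pvStepB []).filter (fun p => p.1 == c)).map (fun p => p.2))))
  rw [hB, PySem.List.dedup_eq_ofList]
  apply List.map_congr_left
  intro c _
  rw [foldA_getD tests _ c hpre, PySem.Set.ofList_eq_foldl]
  simp [PySem.Dict.getD, PySem.Dict.get?, PySem.Dict.empty]
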